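-- pv_equiv track=rewrite | github.com/ChoHyoungSeo/Algorithm_prac | python/programmers/stack_queue_1.py | solution
-- ===== SOURCE A (Python) =====
-- from collections import Counter
--
-- def solution(progresses, speeds):
--     answer = []
--     i = 0
--     ans_lis=[]
--     while True:
--         if i == len(progresses):
--             break
--         samp = progresses[i]
--         samp_s = speeds[i]
--         if ((100 - samp) % samp_s) == 0 :
--             day = (100 - samp) // samp_s
--         else:
--             day = ((100 - samp) // samp_s) + 1
--         try:
--             tmp = ans_lis[i-1]
--         except:
--             tmp = day
--         if day < tmp:
--             day = tmp
--         ans_lis.append(day)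
--         i += 1
--
--     ans_dict = dict(Counter(ans_lis).most_common(len(progresses)))
--     for _, ans_num in enumerate(sorted(ans_dict.items())):
--         answer.append(ans_num[1])
--     return answer
-- ===== SOURCE B (Python) =====
-- def solution(progresses, speeds):
--     answer = []
--     cur_day = None
--     cur_cnt = 0
--     for p, s in zip(progresses, speeds):
--         day = -((p - 100) // s)          # ceil((100 - p) / s)
--         if cur_day is not None and day < cur_day:
--             day = cur_day                # cannot deploy before the previous task
--         if cur_day is not None and day == cur_day:
--             cur_cnt += 1
--         else:
--             if cur_day is not None:
--                 answer.append(cur_cnt)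
--             cur_day, cur_cnt = day, 1
--     if cur_day is not None:
--         answer.append(cur_cnt)
--     return answer
-- ===== Notes on version B (the rewrite author's own statement) =====
-- stated objective: simpler
-- what changed: B replaces A's build-clamped-day-list + Counter + most_common + dict + sort pipeline by one pass over zip(progresses, speeds) that computes each ceil day with -((p-100)//s), clamps it to the running maximum, and counts consecutive equal-day groups inline, so no intermediate list, counter or sort is built.
import Mathlib
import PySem

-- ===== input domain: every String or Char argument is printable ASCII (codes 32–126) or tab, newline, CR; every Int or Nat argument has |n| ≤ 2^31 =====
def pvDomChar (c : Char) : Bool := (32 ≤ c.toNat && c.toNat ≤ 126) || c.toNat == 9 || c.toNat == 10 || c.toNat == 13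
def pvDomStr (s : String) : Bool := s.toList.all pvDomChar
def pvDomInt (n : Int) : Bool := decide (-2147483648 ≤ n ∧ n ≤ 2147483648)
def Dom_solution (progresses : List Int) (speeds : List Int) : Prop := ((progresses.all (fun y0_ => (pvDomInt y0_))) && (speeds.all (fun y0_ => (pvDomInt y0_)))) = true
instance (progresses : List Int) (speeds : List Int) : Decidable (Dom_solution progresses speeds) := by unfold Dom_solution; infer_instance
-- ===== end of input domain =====

-- B replaces A's day-list + Counter + most_common + sort pipeline by a single grouping
-- pass over zip(progresses, speeds) (objective: simpler).

-- ===== PORT A =====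
-- the 'while True' loop; Python exits at i == len(progresses); i counts up from 0, so 'len ≤ i' is the same exit
def solutionLoop (progresses : List Int) (speeds : List Int) (i : Nat) (ans_lis : List Int) : List Int :=
  if _h : progresses.length ≤ i then ans_lis
  else
    let samp := PySem.List.pyGetD progresses (i : Int) 0      -- progresses[i]; in range here
    let samp_s := PySem.List.pyGetD speeds (i : Int) 0        -- speeds[i]; Pre_ gives i < len speeds
    let day := if PySem.Int.mod (100 - samp) samp_s == 0      -- Pre_ gives samp_s ≠ 0
               then PySem.Int.floordiv (100 - samp) samp_s
               else PySem.Int.floordiv (100 - samp) samp_s + 1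
    let tmp := (PySem.List.pyGet? ans_lis ((i : Int) - 1)).getD day   -- try: ans_lis[i-1] except: day
    let day := if day < tmp then tmp else day
    solutionLoop progresses speeds (i + 1) (ans_lis ++ [day])
termination_by progresses.length - i
decreasing_by omega

def solution (progresses : List Int) (speeds : List Int) : List Int :=
  let ans_lis := solutionLoop progresses speeds 0 []
  -- dict(Counter(ans_lis).most_common(len(progresses)))
  let ans_dict := PySem.Dict.ofList
    ((PySem.List.sorted (PySem.Dict.counter ans_lis).items (fun kv => kv.2) true).take progresses.length)
  -- for _, ans_num in enumerate(sorted(ans_dict.items())): answer.append(ans_num[1])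
  (PySem.List.enumerate (PySem.List.sorted2 ans_dict.items (fun kv => kv.1) (fun kv => kv.2))).foldl
    (fun answer e => answer ++ [e.2.2]) []

-- ===== PORT B =====
def solution_alt (progresses : List Int) (speeds : List Int) : List Int :=
  let step := fun (st : Option (Int × Int) × List Int) (pr : Int × Int) =>
    let day := -(PySem.Int.floordiv (pr.1 - 100) pr.2)
    match st.1 with
    | none => (some (day, 1), st.2)
    | some (cd, cc) =>
      let day := if day < cd then cd else day
      if day == cd then (some (cd, cc + 1), st.2)
      else (some (day, 1), st.2 ++ [cc])
  match (progresses.zip speeds).foldl step (none, []) with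
  | (none, answer) => answer
  | (some (_, cc), answer) => answer ++ [cc]

-- ===== PRECONDITION & SPEC =====
-- A raises IndexError when speeds is shorter than progresses and ZeroDivisionError on a zero
-- speed among the first len(progresses) speeds; Pre_ excludes exactly those inputs.
def Pre_solution (progresses : List Int) (speeds : List Int) : Prop :=
  progresses.length ≤ speeds.length ∧ ∀ s ∈ speeds.take progresses.length, s ≠ 0
instance (progresses : List Int) (speeds : List Int) : Decidable (Pre_solution progresses speeds) := by
  unfold Pre_solution; infer_instance

def pvWitness_solution : List Int × List Int := ([93, 30, 55], [1, 30, 5])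

def Spec_solution (progresses : List Int) (speeds : List Int) (out : List Int) : Prop :=
  out = solution_alt progresses speeds
instance (progresses : List Int) (speeds : List Int) (out : List Int) : Decidable (Spec_solution progresses speeds out) := by
  unfold Spec_solution; infer_instance

-- ===== CLAIM (what is proved, stated in full; the proofs are below) =====
def Claim_equal_solution : Prop := ∀ (progresses : List Int) (speeds : List Int), Dom_solution progresses speeds → Pre_solution progresses speeds → Spec_solution progresses speeds (solution progresses speeds)

-- ===== LEMMAS AND PROOFS =====

-- ceil((100 - p) / s), the day both programs compute
def dayB (p s : Int) : Int := -(PySem.Int.floordiv (p - 100) s)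

-- the clamped day list A's loop builds (and B groups), one value per zip pair
def daysSpec : Option Int → List (Int × Int) → List Int
  | _, [] => []
  | po, pr :: t =>
    let d0 := dayB pr.1 pr.2
    let d := match po with
             | none => d0
             | some c => if d0 < c then c else d0
    d :: daysSpec (some d) t

-- B's grouping pass, seeded with a current day and count
def groupAdd (cd cc : Int) : List Int → List Int
  | [] => [cc]
  | d :: t => if d == cd then groupAdd cd (cc + 1) t else cc :: groupAdd d 1 t

-- counts of the distinct values in first-appearance order (what A's pipeline returns)
def dedupCounts (l : List Int) : List Int :=
  (PySem.List.dedup l).map (fun k => (l.count k : Int))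

lemma daysSpec_nil (po : Option Int) : daysSpec po [] = [] := by cases po <;> rfl

lemma daysSpec_cons_none (pr : Int × Int) (t : List (Int × Int)) :
    daysSpec none (pr :: t) = dayB pr.1 pr.2 :: daysSpec (some (dayB pr.1 pr.2)) t := rfl

lemma daysSpec_cons_some (c : Int) (pr : Int × Int) (t : List (Int × Int)) :
    daysSpec (some c) (pr :: t)
      = (if dayB pr.1 pr.2 < c then c else dayB pr.1 pr.2)
        :: daysSpec (some (if dayB pr.1 pr.2 < c then c else dayB pr.1 pr.2)) t := rfl

lemma daysSpec_length (t : List (Int × Int)) : ∀ po, (daysSpec po t).length = t.length := by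
  induction t with
  | nil => intro po; rw [daysSpec_nil]; rfl
  | cons pr t ih =>
    intro po
    cases po with
    | none => rw [daysSpec_cons_none]; simp [ih]
    | some c => rw [daysSpec_cons_some]; simp [ih]

lemma dayCeil_eq (p s : Int) (hs : s ≠ 0) :
    (if PySem.Int.mod (100 - p) s == 0
     then PySem.Int.floordiv (100 - p) s
     else PySem.Int.floordiv (100 - p) s + 1) = dayB p s := by
  unfold dayB
  rw [show p - 100 = -(100 - p) by ring]
  set a := 100 - p with ha
  set q := PySem.Int.floordiv a s with hq
  set r := PySem.Int.mod a s with hr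
  set q' := PySem.Int.floordiv (-a) s with hq'
  set r' := PySem.Int.mod (-a) s with hr'
  have hb : q * s + r = a := PySem.Int.floordiv_mul_add_mod a s
  have hb' : q' * s + r' = -a := PySem.Int.floordiv_mul_add_mod (-a) s
  have hdvd : r = 0 ↔ r' = 0 := by
    rw [hr, hr', PySem.Int.mod_eq_zero_iff_dvd, PySem.Int.mod_eq_zero_iff_dvd, Int.dvd_neg]
  by_cases h0 : r = 0
  · have h0' : r' = 0 := hdvd.mp h0
    simp only [h0, beq_self_eq_true, if_true]
    have h2 : (q + q') * s = 0 := by linear_combination hb + hb' - h0 - h0'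
    rcases mul_eq_zero.mp h2 with h | h
    · omega
    · exact absurd h hs
  · have h0' : r' ≠ 0 := fun h => h0 (hdvd.mpr h)
    have hif : (r == 0) = false := by simp [h0]
    rw [hif]
    simp only [Bool.false_eq_true, if_false]
    have hXY : q * s + q' * s = -(r + r') := by linear_combination hb + hb'
    have hkey : q + q' = -1 := by
      rcases lt_or_gt_of_ne hs with hneg | hpos
      · obtain ⟨hrl, hru⟩ := PySem.Int.mod_neg_bounds a hneg
        obtain ⟨hrl', hru'⟩ := PySem.Int.mod_neg_bounds (-a) hneg
        rw [← hr] at hrl hru; rw [← hr'] at hrl' hru'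
        have hrneg : r < 0 := lt_of_le_of_ne hru h0
        have hrneg' : r' < 0 := lt_of_le_of_ne hru' h0'
        have he : (q + q') * s = q * s + q' * s := by ring
        have h1 : q + q' ≤ -1 := by
          by_contra hcon
          push Not at hcon
          have hge : (q + q') * s ≤ 0 := mul_nonpos_of_nonneg_of_nonpos (by omega) hneg.le
          omega
        have h2 : -1 ≤ q + q' := by
          by_contra hcon
          push Not at hcon
          have hle : -2 * s ≤ (q + q') * s :=
            mul_le_mul_of_nonpos_right (by omega) hneg.le
          have : -2 * s = -(2 * s) := by ring
          omega
        omega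
      · have hrl := PySem.Int.mod_nonneg a hpos
        have hru := PySem.Int.mod_lt a hpos
        have hrl' := PySem.Int.mod_nonneg (-a) hpos
        have hru' := PySem.Int.mod_lt (-a) hpos
        rw [← hr] at hrl hru; rw [← hr'] at hrl' hru'
        have hrpos : 0 < r := lt_of_le_of_ne hrl (Ne.symm h0)
        have hrpos' : 0 < r' := lt_of_le_of_ne hrl' (Ne.symm h0')
        have he : (q + q') * s = q * s + q' * s := by ring
        have h1 : q + q' ≤ -1 := by
          by_contra hcon
          push Not at hcon
          have hge : 0 ≤ (q + q') * s := mul_nonneg (by omega) hpos.le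
          omega
        have h2 : -1 ≤ q + q' := by
          by_contra hcon
          push Not at hcon
          have hle : (q + q') * s ≤ -2 * s :=
            mul_le_mul_of_nonneg_right (by omega) hpos.le
          have : -2 * s = -(2 * s) := by ring
          omega
        omega
    omega

lemma daysSpec_lb (t : List (Int × Int)) : ∀ c, ∀ x ∈ daysSpec (some c) t, c ≤ x := by
  induction t with
  | nil => intro c x hx; rw [daysSpec_nil] at hx; cases hx
  | cons pr t ih =>
    intro c x hx
    rw [daysSpec_cons_some] at hx
    have hcd : c ≤ if dayB pr.1 pr.2 < c then c else dayB pr.1 pr.2 := by split <;> omega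
    rcases List.mem_cons.mp hx with h | h
    · omega
    · exact le_trans hcd (ih _ x h)

lemma daysSpec_sorted (t : List (Int × Int)) : ∀ po, (daysSpec po t).Pairwise (· ≤ ·) := by
  induction t with
  | nil => intro po; rw [daysSpec_nil]; exact List.Pairwise.nil
  | cons pr t ih =>
    intro po
    cases po with
    | none =>
      rw [daysSpec_cons_none]
      exact List.pairwise_cons.mpr ⟨fun y hy => daysSpec_lb t _ y hy, ih _⟩
    | some c =>
      rw [daysSpec_cons_some]
      exact List.pairwise_cons.mpr ⟨fun y hy => daysSpec_lb t _ y hy, ih _⟩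

-- Set.ofList pulls the head out and filters it from the tail
lemma foldl_add_cons (u : List Int) : ∀ (a : Int) (s : List Int),
    List.foldl PySem.Set.add (a :: s) u
      = a :: List.foldl PySem.Set.add s (u.filter (fun x => !(x == a))) := by
  induction u with
  | nil => intro a s; simp
  | cons x u ih =>
    intro a s
    simp only [List.foldl_cons, List.filter_cons]
    by_cases hxa : x = a
    · subst hxa
      have h1 : PySem.Set.add (x :: s) x = x :: s := by
        simp [PySem.Set.add, PySem.Set.contains]
      rw [h1]
      simpa using ih x s
    · by_cases hs' : x ∈ s
      · have h1 : PySem.Set.add (a :: s) x = a :: s := by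
          simp [PySem.Set.add, PySem.Set.contains, hs']
        have h2 : PySem.Set.add s x = s := by
          simp [PySem.Set.add, PySem.Set.contains, hs']
        rw [h1]
        have hfk : (!(x == a)) = true := by simp [hxa]
        rw [if_pos hfk, List.foldl_cons, h2]
        exact ih a s
      · have h1 : PySem.Set.add (a :: s) x = a :: (s ++ [x]) := by
          simp only [PySem.Set.add, PySem.Set.contains, List.contains_eq_mem]
          rw [if_neg (by simp [hxa, hs'])]
          rfl
        have h2 : PySem.Set.add s x = s ++ [x] := by
          simp only [PySem.Set.add, PySem.Set.contains, List.contains_eq_mem]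
          rw [if_neg (by simp [hs'])]
        rw [h1]
        have hfk : (!(x == a)) = true := by simp [hxa]
        rw [if_pos hfk, List.foldl_cons, h2]
        exact ih a (s ++ [x])

lemma ofList_cons_filter (d : Int) (t : List Int) :
    PySem.Set.ofList (d :: t) = d :: PySem.Set.ofList (t.filter (fun x => !(x == d))) := by
  show List.foldl PySem.Set.add PySem.Set.empty (d :: t) = _
  rw [List.foldl_cons]
  have h1 : PySem.Set.add PySem.Set.empty d = d :: ([] : List Int) := by
    simp [PySem.Set.add, PySem.Set.contains, PySem.Set.empty]
  rw [h1]
  exact foldl_add_cons t d []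

lemma ofList_sublist (t : List Int) : (PySem.Set.ofList t).Sublist t := by
  have key : ∀ n (t : List Int), t.length ≤ n → (PySem.Set.ofList t).Sublist t := by
    intro n
    induction n with
    | zero =>
      intro t ht
      have : t = [] := List.eq_nil_of_length_eq_zero (by omega)
      subst this
      exact List.Sublist.refl _
    | succ n ih =>
      intro t ht
      cases t with
      | nil => exact List.Sublist.refl _
      | cons d t' =>
        rw [ofList_cons_filter]
        refine List.Sublist.cons₂ d ?_
        have hlf : (t'.filter (fun x => !(x == d))).length ≤ n := by
          have := List.length_filter_le (fun x => !(x == d)) t'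
          simp only [List.length_cons] at ht
          omega
        exact (ih _ hlf).trans List.filter_sublist
  exact key t.length t le_rfl

lemma ofList_pairwise_lt (t : List Int) (h : t.Pairwise (· ≤ ·)) :
    (PySem.Set.ofList t).Pairwise (· < ·) := by
  have h1 : (PySem.Set.ofList t).Pairwise (· ≤ ·) :=
    List.Pairwise.sublist (ofList_sublist t) h
  have h2 : (PySem.Set.ofList t).Pairwise (· ≠ ·) := PySem.Set.nodup_ofList t
  exact List.Pairwise.imp (fun hab => lt_of_le_of_ne hab.1 hab.2) (h1.and h2)

lemma dedupCounts_cons (d : Int) (t : List Int) :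
    dedupCounts (d :: t)
      = ((1 + t.count d : Int)) :: dedupCounts (t.filter (fun x => !(x == d))) := by
  unfold dedupCounts
  rw [PySem.List.dedup_eq_ofList, PySem.List.dedup_eq_ofList, ofList_cons_filter, List.map_cons]
  congr 1
  · rw [List.count_cons]
    simp only [beq_self_eq_true, if_true]
    push_cast
    ring
  · apply List.map_congr_left
    intro k hk
    have hkmem : k ∈ t.filter (fun x => !(x == d)) := (PySem.Set.mem_ofList _ k).mp hk
    have hkd : k ≠ d := by
      have := List.of_mem_filter hkmem
      simpa using this
    have h1 : (d :: t).count k = t.count k := by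
      rw [List.count_cons]
      simp [show (d == k) = false by simp [Ne.symm hkd]]
    have h2 : (t.filter (fun x => !(x == d))).count k = t.count k :=
      List.count_filter (by simp [hkd])
    rw [h1, h2]

-- B's grouping of a sorted tail with a seed below it
lemma groupAdd_eq (t : List Int) : ∀ cd cc, t.Pairwise (· ≤ ·) → (∀ x ∈ t, cd ≤ x) →
    groupAdd cd cc t = (cc + t.count cd) :: dedupCounts (t.filter (fun x => !(x == cd))) := by
  induction t with
  | nil =>
    intro cd cc _ _
    simp [groupAdd, dedupCounts, PySem.List.dedup, PySem.Set.ofList]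
  | cons d t' ih =>
    intro cd cc hp hlb
    have hp' : t'.Pairwise (· ≤ ·) := (List.pairwise_cons.mp hp).2
    have hdall : ∀ x ∈ t', d ≤ x := (List.pairwise_cons.mp hp).1
    have hcd : cd ≤ d := hlb d (by simp)
    by_cases hdc : d = cd
    · subst hdc
      rw [show groupAdd d cc (d :: t') = groupAdd d (cc + 1) t' by simp [groupAdd]]
      rw [ih d (cc + 1) hp' hdall]
      congr 1
      · rw [List.count_cons]
        simp only [beq_self_eq_true, if_true]
        push_cast
        ring
      · congr 1
        simp
    · have hlt : cd < d := lt_of_le_of_ne hcd (Ne.symm hdc)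
      have hnotmem : cd ∉ d :: t' := by
        intro hmem
        rcases List.mem_cons.mp hmem with h | h
        · omega
        · exact absurd (hdall _ h) (by omega)
      rw [show groupAdd cd cc (d :: t') = cc :: groupAdd d 1 t' by
        simp [groupAdd, show (d == cd) = false by simp [hdc]]]
      rw [ih d 1 hp' hdall]
      have hcount : (d :: t').count cd = 0 := List.count_eq_zero.mpr hnotmem
      have hfilter : (d :: t').filter (fun x => !(x == cd)) = d :: t' :=
        List.filter_eq_self.mpr (by
          intro a ha
          simp only [Bool.not_eq_true', beq_eq_false_iff_ne, ne_eq]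
          intro h
          exact hnotmem (h ▸ ha))
      rw [hcount, hfilter, dedupCounts_cons]
      norm_num

-- dict preserves a list of pairs with distinct keys
lemma items_update (ps : List (Int × Int)) : ∀ (d : PySem.Dict Int Int),
    (ps.map Prod.fst).Nodup → (∀ k ∈ ps.map Prod.fst, d.contains k = false) →
    (d.update ps).items = d.items ++ ps := by
  induction ps with
  | nil => intro d _ _; simp [PySem.Dict.update]
  | cons p ps ih =>
    intro d hnd hfresh
    obtain ⟨k, v⟩ := p
    have hck : d.contains k = false := hfresh k (by simp)
    have hins : (d.insert k v).items = d.items ++ [(k, v)] := by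
      simp [PySem.Dict.insert, hck]
    have h2 : ∀ k' ∈ ps.map Prod.fst, (d.insert k v).contains k' = false := by
      intro k' hk'
      rw [PySem.Dict.contains_insert]
      have hne : k' ≠ k := by
        intro h
        subst h
        simp only [List.map_cons, List.nodup_cons] at hnd
        exact hnd.1 hk'
      simp [hne, hfresh k' (by simp [hk'])]
    have hnd' : (ps.map Prod.fst).Nodup := by
      simp only [List.map_cons, List.nodup_cons] at hnd
      exact hnd.2
    have hstep : d.update ((k, v) :: ps) = (d.insert k v).update ps := rfl
    rw [hstep, ih (d.insert k v) hnd' h2, hins]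
    simp

lemma insertBy_congr (f g : Int × Int → Int × Int → Bool) (x : Int × Int) :
    ∀ acc, (∀ b ∈ acc, f x b = g x b) →
    PySem.List.insertBy f x acc = PySem.List.insertBy g x acc := by
  intro acc
  induction acc with
  | nil => intro _; rfl
  | cons b acc ih =>
    intro h
    have e1 : PySem.List.insertBy f x (b :: acc)
        = if f x b = true then x :: b :: acc else b :: PySem.List.insertBy f x acc := rfl
    have e2 : PySem.List.insertBy g x (b :: acc)
        = if g x b = true then x :: b :: acc else b :: PySem.List.insertBy g x acc := rfl
    rw [e1, e2, h b (by simp)]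
    by_cases hg : g x b = true
    · rw [if_pos hg, if_pos hg]
    · rw [if_neg hg, if_neg hg, ih (fun c hc => h c (by simp [hc]))]

lemma foldl_insertBy_congr (f g : Int × Int → Int × Int → Bool) (S : List (Int × Int))
    (hfg : ∀ a ∈ S, ∀ b ∈ S, f a b = g a b) :
    ∀ (l acc : List (Int × Int)), (∀ a ∈ l, a ∈ S) → (∀ a ∈ acc, a ∈ S) →
    l.foldl (fun acc x => PySem.List.insertBy f x acc) acc
      = l.foldl (fun acc x => PySem.List.insertBy g x acc) acc := by
  intro l
  induction l with
  | nil => intro acc _ _; rfl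
  | cons y l ih =>
    intro acc hl hacc
    simp only [List.foldl_cons]
    have hy : y ∈ S := hl y (by simp)
    rw [insertBy_congr f g y acc (fun b hb => hfg y hy b (hacc b hb))]
    apply ih
    · exact fun a ha => hl a (by simp [ha])
    · intro a ha
      rcases (PySem.List.mem_insertBy _ y a acc).mp ha with rfl | ha'
      · exact hy
      · exact hacc a ha'

-- Python's sorted on pairs with pairwise-distinct firsts is sorting by first
lemma sorted2_eq_sorted_fst (xs : List (Int × Int))
    (h : ∀ a ∈ xs, ∀ b ∈ xs, a.1 = b.1 → a = b) :
    PySem.List.sorted2 xs (fun kv => kv.1) (fun kv => kv.2)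
      = PySem.List.sorted xs (fun kv => kv.1) := by
  have e2 : PySem.List.sorted2 xs (fun kv => kv.1) (fun kv => kv.2)
      = xs.foldl (fun acc x => PySem.List.insertBy
          (fun a b => decide (a.1 < b.1) || (!decide (b.1 < a.1) && decide (a.2 < b.2))) x acc) [] := rfl
  have e1 : PySem.List.sorted xs (fun kv => kv.1)
      = xs.foldl (fun acc x => PySem.List.insertBy
          (fun a b => decide (a.1 < b.1)) x acc) [] := rfl
  rw [e1, e2]
  apply foldl_insertBy_congr _ _ xs _ xs [] (fun a ha => ha) (by simp)
  intro a ha b hb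
  by_cases h1 : a.1 < b.1
  · simp [h1]
  · by_cases h2 : b.1 < a.1
    · simp [h1, h2]
    · have hab : a = b := h a ha b hb (le_antisymm (not_lt.mp h2) (not_lt.mp h1))
      subst hab
      simp

-- A's Counter/most_common/dict/sorted pipeline on a sorted list yields dedupCounts
lemma postA_eq (L : List Int) (n : Nat) (hn : L.length ≤ n) (hs : L.Pairwise (· ≤ ·)) :
    (PySem.List.enumerate (PySem.List.sorted2
        (PySem.Dict.ofList
          ((PySem.List.sorted (PySem.Dict.counter L).items (fun kv => kv.2) true).take n)).items
        (fun kv => kv.1) (fun kv => kv.2))).foldl (fun answer e => answer ++ [e.2.2]) []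
      = dedupCounts L := by
  have hitems : (PySem.Dict.counter L).items
      = (PySem.Set.ofList L).map (fun k => (k, (L.count k : Int))) := PySem.Dict.items_counter L
  have hlen1 : (PySem.List.sorted (PySem.Dict.counter L).items (fun kv => kv.2) true).length ≤ n := by
    rw [PySem.List.length_sorted, hitems, List.length_map]
    exact le_trans (ofList_sublist L).length_le hn
  rw [List.take_of_length_le hlen1]
  set items := (PySem.Dict.counter L).items with hitemsdef
  set mc := PySem.List.sorted items (fun kv => kv.2) true with hmc
  have hperm : mc.Perm items := PySem.List.sorted_perm items (fun kv => kv.2) true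
  have hpairlt : items.Pairwise (fun a b => a.1 < b.1) := by
    rw [hitems, List.pairwise_map]
    exact ofList_pairwise_lt L hs
  have hkeysnodup : (mc.map Prod.fst).Nodup := by
    have h1 : (items.map Prod.fst).Nodup :=
      List.pairwise_map.mpr (hpairlt.imp (fun hab => ne_of_lt hab))
    exact ((hperm.map Prod.fst).nodup_iff).mpr h1
  have hdict : (PySem.Dict.ofList mc).items = mc := by
    show (PySem.Dict.empty.update mc).items = mc
    rw [items_update mc PySem.Dict.empty hkeysnodup
      (fun k _ => by simp [PySem.Dict.contains, PySem.Dict.empty])]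
    simp [PySem.Dict.empty]
  rw [hdict]
  have hsorted2 : PySem.List.sorted2 mc (fun kv => kv.1) (fun kv => kv.2) = items := by
    rw [sorted2_eq_sorted_fst mc (fun a ha b hb hab =>
      List.inj_on_of_nodup_map hkeysnodup ha hb hab)]
    exact PySem.List.sorted_eq_of_perm_of_pairwise_lt mc items (fun kv => kv.1) hperm.symm hpairlt
  rw [hsorted2]
  have hfold := PySem.List.foldl_append_singleton_eq_map
    (fun (e : Int × Int × Int) => e.2.2) (PySem.List.enumerate items) ([] : List Int)
  rw [hfold]
  simp only [List.nil_append]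
  have hmap : (PySem.List.enumerate items).map (fun e => e.2.2)
      = items.map (fun kv => kv.2) := by
    rw [show (fun (e : Int × Int × Int) => e.2.2)
        = (fun (kv : Int × Int) => kv.2) ∘ (fun (e : Int × Int × Int) => e.2) from rfl]
    rw [← List.map_map]
    rw [PySem.List.map_snd_enumerate]
  rw [hmap, hitems, List.map_map]
  unfold dedupCounts
  rw [PySem.List.dedup_eq_ofList]
  rfl

-- Python negative index -1 on a nonempty list reads the last element
lemma pyGet?_last (l : List Int) (hl : l ≠ []) :
    PySem.List.pyGet? l ((l.length : Int) - 1) = l.getLast? := by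
  have hpos : 0 < l.length := List.length_pos_of_ne_nil hl
  unfold PySem.List.pyGet? PySem.List.pyIdx?
  rw [if_pos (by omega), if_pos (by omega)]
  simp only [Option.bind_some]
  rw [List.getLast?_eq_getElem?]
  congr 1
  omega

-- A's while loop builds daysSpec
lemma loopA_eq (ps ss : List Int) (hlen : ps.length ≤ ss.length)
    (hnz : ∀ s ∈ ss.take ps.length, s ≠ 0) :
    ∀ m k (acc : List Int), ps.length - k = m → k ≤ ps.length → acc.length = k →
    solutionLoop ps ss k acc = acc ++ daysSpec acc.getLast? ((ps.zip ss).drop k) := by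
  intro m
  induction m with
  | zero =>
    intro k acc hm hk hacc
    rw [solutionLoop, dif_pos (by omega)]
    rw [List.drop_eq_nil_of_le (by rw [List.length_zip]; omega), daysSpec_nil, List.append_nil]
  | succ m ih =>
    intro k acc hm hk hacc
    have hklt : k < ps.length := by omega
    have hkss : k < ss.length := by omega
    have hkzip : k < (ps.zip ss).length := by rw [List.length_zip]; omega
    rw [solutionLoop, dif_neg (by omega)]
    have hsamp : PySem.List.pyGetD ps (k : Int) 0 = ps[k] := by
      rw [PySem.List.pyGetD_natCast]; exact List.getD_eq_getElem ps 0 hklt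
    have hsamps : PySem.List.pyGetD ss (k : Int) 0 = ss[k] := by
      rw [PySem.List.pyGetD_natCast]; exact List.getD_eq_getElem ss 0 hkss
    have hsnz : ss[k] ≠ 0 := by
      have hkt : k < (ss.take ps.length).length := by
        rw [List.length_take]; omega
      have hmem : (ss.take ps.length)[k] ∈ ss.take ps.length := List.getElem_mem hkt
      rw [List.getElem_take] at hmem
      exact hnz _ hmem
    rw [List.drop_eq_getElem_cons hkzip, List.getElem_zip]
    rcases Nat.eq_zero_or_pos k with hk0 | hkpos
    · subst hk0
      have haccnil : acc = [] := List.eq_nil_of_length_eq_zero hacc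
      subst haccnil
      simp only [hsamp, hsamps]
      have htmp : PySem.List.pyGet? ([] : List Int) (((0 : Nat) : Int) - 1) = none := rfl
      rw [htmp]
      simp only [Option.getD_none]
      rw [dayCeil_eq ps[0] ss[0] hsnz]
      rw [if_neg (lt_irrefl _)]
      have hrec := ih 1 ([] ++ [dayB ps[0] ss[0]]) (by omega) (by omega) (by simp)
      rw [hrec]
      simp only [List.getLast?_nil]
      rw [daysSpec_cons_none]
      simp
    · have haccne : acc ≠ [] := by
        intro h; subst h; simp at hacc; omega
      obtain ⟨ys, y, rfl⟩ := (List.eq_nil_or_concat acc).resolve_left haccne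
      simp only [List.concat_eq_append] at hacc ⊢
      simp only [hsamp, hsamps]
      have htmp : PySem.List.pyGet? (ys ++ [y]) ((k : Int) - 1) = some y := by
        rw [← hacc, pyGet?_last (ys ++ [y]) (by simp), List.getLast?_concat]
      rw [htmp]
      simp only [Option.getD_some]
      rw [dayCeil_eq ps[k] ss[k] hsnz]
      rw [List.getLast?_concat]
      rw [daysSpec_cons_some]
      have hrec := ih (k + 1)
        ((ys ++ [y]) ++ [if dayB ps[k] ss[k] < y then y else dayB ps[k] ss[k]])
        (by omega) (by omega) (by simp at hacc ⊢; omega)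
      rw [hrec, List.getLast?_concat]
      simp [List.append_assoc]

-- B's fold is groupAdd over daysSpec
lemma foldB_eq (t : List (Int × Int)) :
    ∀ cd cc (ans : List Int),
    (match t.foldl (fun (st : Option (Int × Int) × List Int) (pr : Int × Int) =>
        let day := -(PySem.Int.floordiv (pr.1 - 100) pr.2)
        match st.1 with
        | none => (some (day, 1), st.2)
        | some (cd, cc) =>
          let day := if day < cd then cd else day
          if day == cd then (some (cd, cc + 1), st.2)
          else (some (day, 1), st.2 ++ [cc])) (some (cd, cc), ans) with
      | (none, answer) => answer
      | (some (_, cc), answer) => answer ++ [cc])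
      = ans ++ groupAdd cd cc (daysSpec (some cd) t) := by
  induction t with
  | nil =>
    intro cd cc ans
    rw [daysSpec_nil]
    rfl
  | cons pr t ih =>
    intro cd cc ans
    rw [List.foldl_cons]
    show (match t.foldl _
        (if (if dayB pr.1 pr.2 < cd then cd else dayB pr.1 pr.2) == cd
         then (some (cd, cc + 1), ans)
         else (some (if dayB pr.1 pr.2 < cd then cd else dayB pr.1 pr.2, 1), ans ++ [cc])) with
      | (none, answer) => answer
      | (some (_, cc), answer) => answer ++ [cc]) = _
    rw [daysSpec_cons_some]
    by_cases hb : (if dayB pr.1 pr.2 < cd then cd else dayB pr.1 pr.2) = cd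
    · rw [if_pos (beq_iff_eq.mpr hb), hb]
      rw [show groupAdd cd cc (cd :: daysSpec (some cd) t)
          = groupAdd cd (cc + 1) (daysSpec (some cd) t) by simp [groupAdd]]
      exact ih cd (cc + 1) ans
    · rw [if_neg (by simpa using hb)]
      rw [show groupAdd cd cc
            ((if dayB pr.1 pr.2 < cd then cd else dayB pr.1 pr.2)
              :: daysSpec (some (if dayB pr.1 pr.2 < cd then cd else dayB pr.1 pr.2)) t)
          = cc :: groupAdd (if dayB pr.1 pr.2 < cd then cd else dayB pr.1 pr.2) 1
              (daysSpec (some (if dayB pr.1 pr.2 < cd then cd else dayB pr.1 pr.2)) t) by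
        simp [groupAdd, show ((if dayB pr.1 pr.2 < cd then cd else dayB pr.1 pr.2) == cd) = false
          by simpa using hb]]
      rw [ih _ 1 (ans ++ [cc])]
      simp [List.append_assoc]

-- ===== VERDICT (by name: the statement is the Claim_ definition above) =====
theorem solution_spec : Claim_equal_solution := by
  intro ps ss _hdom hpre
  unfold Spec_solution
  obtain ⟨hlen, hnz⟩ := hpre
  show solution ps ss = solution_alt ps ss
  unfold solution
  have hloop := loopA_eq ps ss hlen hnz ps.length 0 [] (by omega) (by omega) rfl
  simp only [List.drop_zero, List.nil_append, List.getLast?_nil] at hloop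
  simp only [hloop]
  rw [postA_eq (daysSpec none (ps.zip ss)) ps.length
    (by rw [daysSpec_length, List.length_zip]; omega)
    (daysSpec_sorted (ps.zip ss) none)]
  unfold solution_alt
  cases hz : ps.zip ss with
  | nil =>
    rw [daysSpec_nil]
    rfl
  | cons pr t =>
    show dedupCounts (daysSpec none (pr :: t)) =
      (match (pr :: t).foldl (fun (st : Option (Int × Int) × List Int) (pr : Int × Int) =>
          let day := -(PySem.Int.floordiv (pr.1 - 100) pr.2)
          match st.1 with
          | none => (some (day, 1), st.2)
          | some (cd, cc) =>
            let day := if day < cd then cd else day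
            if day == cd then (some (cd, cc + 1), st.2)
            else (some (day, 1), st.2 ++ [cc])) (none, ([] : List Int)) with
        | (none, answer) => answer
        | (some (_, cc), answer) => answer ++ [cc])
    rw [List.foldl_cons]
    show dedupCounts (daysSpec none (pr :: t)) =
      (match t.foldl (fun (st : Option (Int × Int) × List Int) (pr : Int × Int) =>
          let day := -(PySem.Int.floordiv (pr.1 - 100) pr.2)
          match st.1 with
          | none => (some (day, 1), st.2)
          | some (cd, cc) =>
            let day := if day < cd then cd else day
            if day == cd then (some (cd, cc + 1), st.2)
            else (some (day, 1), st.2 ++ [cc]))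
          (some (-(PySem.Int.floordiv (pr.1 - 100) pr.2), 1), ([] : List Int)) with
        | (none, answer) => answer
        | (some (_, cc), answer) => answer ++ [cc])
    rw [foldB_eq t (-(PySem.Int.floordiv (pr.1 - 100) pr.2)) 1 []]
    rw [daysSpec_cons_none, dedupCounts_cons]
    rw [groupAdd_eq (daysSpec (some (-(PySem.Int.floordiv (pr.1 - 100) pr.2))) t)
      (-(PySem.Int.floordiv (pr.1 - 100) pr.2)) 1
      (daysSpec_sorted t _) (daysSpec_lb t _)]
    simp [dayB]
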